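-- pv_equiv track=rewrite | github.com/chengyitang/interview-algo-practices | tiktok-grad-oa/structures.py | solution
-- ===== SOURCE A (Python) =====
-- def solution(structures):
--     """
--     Calculate the minimum operations needed to create a harmonious pattern.
--
--     Args:
--         structures: List[int] - Array of building heights
--
--     Returns:
--         int - Minimum number of operations needed
--     """
--     if not structures:
--         return 0
--
--     n = len(structures)
--     if n == 1:
--         return 0
--
--     def get_operations_for_pattern(start_height, ascending=True):
--         """Calculate operations needed for a specific pattern starting from start_height"""
--         operations = 0
--
--         for i in range(n):
--             # Calculate target height for this position
--             if ascending:
--                 target_height = start_height + i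
--             else:
--                 target_height = start_height - i
--
--             # If current structure is shorter than target, we need to add height
--             if structures[i] < target_height:
--                 operations += target_height - structures[i]
--
--         return operations
--
--     # For ascending pattern: find optimal starting height
--     # The starting height should be at least max(structures[i] - i) for all i
--     min_ascending_start = 0
--     for i in range(n):
--         min_ascending_start = max(min_ascending_start, structures[i] - i)
--
--     # For descending pattern: find optimal starting height
--     # The starting height should be at least max(structures[i] + i) for all i
--     min_descending_start = 0
--     for i in range(n):
--         min_descending_start = max(min_descending_start, structures[i] + i)
--
--     # Calculate operations for both patterns
--     ascending_ops = get_operations_for_pattern(min_ascending_start, ascending=True)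
--     descending_ops = get_operations_for_pattern(min_descending_start, ascending=False)
--
--     return min(ascending_ops, descending_ops)
-- ===== SOURCE B (Python) =====
-- def solution(structures):
--     n = len(structures)
--     if n <= 1:
--         return 0
--     total = sum(structures)
--     c = n * (n - 1) // 2
--     a = d = 0
--     for i, s in enumerate(structures):
--         a = max(a, s - i)
--         d = max(d, s + i)
--     return min(n * a + c, n * d - c) - total
-- ===== Notes on version B (the rewrite author's own statement) =====
-- stated objective: simpler
-- what changed: Replaces A's per-position summation loops (get_operations_for_pattern for each pattern) with closed-form costs n*start +/- n*(n-1)//2 - total, computed from one fused pass that finds both optimal starts; the optimal start dominates every height, so the per-position conditional sum collapses to a formula.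
import Mathlib
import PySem

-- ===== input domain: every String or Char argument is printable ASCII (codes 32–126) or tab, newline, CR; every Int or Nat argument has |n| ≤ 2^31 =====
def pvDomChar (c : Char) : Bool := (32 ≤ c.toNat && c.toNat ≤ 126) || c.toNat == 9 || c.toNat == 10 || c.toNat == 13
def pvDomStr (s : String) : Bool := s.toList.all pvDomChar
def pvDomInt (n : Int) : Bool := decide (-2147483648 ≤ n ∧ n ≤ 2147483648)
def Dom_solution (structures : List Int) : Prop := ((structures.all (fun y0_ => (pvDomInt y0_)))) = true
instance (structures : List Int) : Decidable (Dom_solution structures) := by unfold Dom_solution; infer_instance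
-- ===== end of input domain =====

-- B replaces A's per-pattern summation loops with a closed-form cost and one fused max pass (simpler; return-value equivalence proved below).


-- ===== PORT A =====
def solution (structures : List Int) : Int :=
  if structures = [] then 0
  else
    let n : Int := structures.length
    if n = 1 then 0
    else
      let ascStart : Int := (PySem.List.pyRange 0 n 1).foldl
        (fun acc i => max acc (PySem.List.pyGetD structures i 0 - i)) 0
      let descStart : Int := (PySem.List.pyRange 0 n 1).foldl
        (fun acc i => max acc (PySem.List.pyGetD structures i 0 + i)) 0
      let ascOps : Int := (PySem.List.pyRange 0 n 1).foldl
        (fun acc i =>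
          let t := ascStart + i
          if PySem.List.pyGetD structures i 0 < t then acc + (t - PySem.List.pyGetD structures i 0) else acc) 0
      let descOps : Int := (PySem.List.pyRange 0 n 1).foldl
        (fun acc i =>
          let t := descStart - i
          if PySem.List.pyGetD structures i 0 < t then acc + (t - PySem.List.pyGetD structures i 0) else acc) 0
      min ascOps descOps

-- ===== PORT B =====
def solution_alt (structures : List Int) : Int :=
  let n : Int := structures.length
  if n ≤ 1 then 0
  else
    let total := structures.sum
    let c := PySem.Int.floordiv (n * (n - 1)) 2
    let ad := (PySem.List.enumerate structures).foldl
      (fun (p : Int × Int) (is : Int × Int) => (max p.1 (is.2 - is.1), max p.2 (is.2 + is.1))) (0, 0)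
    min (n * ad.1 + c) (n * ad.2 - c) - total

-- ===== PRECONDITION & SPEC =====
def Spec_solution (structures : List Int) (out : Int) : Prop := out = solution_alt structures
instance (structures : List Int) (out : Int) : Decidable (Spec_solution structures out) := by unfold Spec_solution; infer_instance

-- ===== CLAIM (what is proved, stated in full; the proofs are below) =====
def Claim_equal_solution : Prop := ∀ (structures : List Int), Dom_solution structures → Spec_solution structures (solution structures)

-- ===== LEMMAS AND PROOFS =====

-- B's fused pair fold is the pair of the two separate max folds.
theorem foldl_pair_max (l : List (Int × Int)) (a d : Int) :
    l.foldl (fun (p : Int × Int) (is : Int × Int) => (max p.1 (is.2 - is.1), max p.2 (is.2 + is.1))) (a, d)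
      = (l.foldl (fun acc p => max acc (p.2 - p.1)) a, l.foldl (fun acc p => max acc (p.2 + p.1)) d) := by
  induction l generalizing a d with
  | nil => rfl
  | cons x xs ih => simp [List.foldl_cons, ih]

-- When the target dominates each height, the conditional-add loop is a plain sum of differences.
theorem ops_sum (l : List (Int × Int)) (t : Int × Int → Int) (init : Int)
    (h : ∀ p ∈ l, p.2 ≤ t p) :
    l.foldl (fun acc p => if p.2 < t p then acc + (t p - p.2) else acc) init
      = init + (l.map t).sum - (l.map (·.2)).sum := by
  induction l generalizing init with
  | nil => simp
  | cons x xs ih =>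
    have hx : x.2 ≤ t x := h x (by simp)
    have hrest : ∀ p ∈ xs, p.2 ≤ t p := fun p hp => h p (by simp [hp])
    by_cases hlt : x.2 < t x
    · simp only [List.foldl_cons, if_pos hlt, ih _ hrest, List.map_cons, List.sum_cons]
      ring
    · have heq : t x = x.2 := le_antisymm (not_lt.mp hlt) hx
      rw [List.foldl_cons, if_neg hlt, ih _ hrest, List.map_cons, List.map_cons,
        List.sum_cons, List.sum_cons, heq]
      ring

theorem sum_fst_enumerate (xs : List Int) (s : Int) :
    ((PySem.List.enumerate xs s).map (·.1)).sum
      = (xs.length : Int) * s + ((xs.length : Int) * ((xs.length : Int) - 1)) / 2 := by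
  induction xs generalizing s with
  | nil => simp [PySem.List.enumerate_nil]
  | cons x xs ih =>
    have key : ((xs.length : Int) * ((xs.length : Int) - 1)) / 2 + (xs.length : Int)
        = (((xs.length : Int) + 1) * (((xs.length : Int) + 1) - 1)) / 2 := by
      have h2 : ((xs.length : Int) * ((xs.length : Int) - 1) + (xs.length : Int) * 2) / 2
          = ((xs.length : Int) * ((xs.length : Int) - 1)) / 2 + (xs.length : Int) :=
        Int.add_mul_ediv_right _ _ (by norm_num)
      rw [show (((xs.length : Int) + 1) * (((xs.length : Int) + 1) - 1))
            = (xs.length : Int) * ((xs.length : Int) - 1) + (xs.length : Int) * 2 by ring]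
      omega
    simp only [PySem.List.enumerate_cons, List.map_cons, List.sum_cons, ih (s + 1),
      List.length_cons]
    push_cast
    rw [← key]
    ring

theorem sum_const_add (l : List (Int × Int)) (a : Int) :
    (l.map (fun p => a + p.1)).sum = a * l.length + (l.map (·.1)).sum := by
  induction l with
  | nil => simp
  | cons x xs ih => simp [ih]; ring

theorem sum_const_sub (l : List (Int × Int)) (a : Int) :
    (l.map (fun p => a - p.1)).sum = a * l.length - (l.map (·.1)).sum := by
  induction l with
  | nil => simp
  | cons x xs ih => simp [ih]; ring

-- ===== VERDICT (by name: the statement is the Claim_ definition above) =====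
theorem solution_spec : Claim_equal_solution := by
  intro structures _
  unfold Spec_solution solution solution_alt
  by_cases hnil : structures = []
  · subst hnil; simp
  · simp only [if_neg hnil]
    by_cases h1 : (structures.length : Int) = 1
    · simp [h1]
    · have hlen : 1 ≤ structures.length := by
        cases structures with
        | nil => exact absurd rfl hnil
        | cons x xs => simp
      have h2 : ¬ ((structures.length : Int) ≤ 1) := by
        push_cast at h1 ⊢; omega
      simp only [if_neg h1, if_neg h2]
      have e := PySem.List.enumerate_eq_map_pyRange structures (0 : Int)
      set l := PySem.List.enumerate structures with hl
      set a := l.foldl (fun acc p => max acc (p.2 - p.1)) 0 with ha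
      set d := l.foldl (fun acc p => max acc (p.2 + p.1)) 0 with hd
      rw [foldl_pair_max]
      have hasc : (PySem.List.pyRange 0 (structures.length : Int)).foldl
          (fun acc i => max acc (PySem.List.pyGetD structures i 0 - i)) 0 = a := by
        rw [ha, e]; simp [List.foldl_map, PySem.List.len]
      have hdesc : (PySem.List.pyRange 0 (structures.length : Int)).foldl
          (fun acc i => max acc (PySem.List.pyGetD structures i 0 + i)) 0 = d := by
        rw [hd, e]; simp [List.foldl_map, PySem.List.len]
      rw [hasc, hdesc]
      have hda : ∀ p ∈ l, p.2 ≤ a + p.1 := by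
        intro p hp
        have := (PySem.List.le_foldl_max_int l (fun p => p.2 - p.1) 0).2 p hp
        rw [← ha] at this; omega
      have hdd : ∀ p ∈ l, p.2 ≤ d - p.1 := by
        intro p hp
        have := (PySem.List.le_foldl_max_int l (fun p => p.2 + p.1) 0).2 p hp
        rw [← hd] at this; omega
      have hopsA : (PySem.List.pyRange 0 (structures.length : Int)).foldl
          (fun acc i => if PySem.List.pyGetD structures i 0 < a + i
            then acc + (a + i - PySem.List.pyGetD structures i 0) else acc) 0
          = l.foldl (fun acc p => if p.2 < (fun p : Int × Int => a + p.1) p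
            then acc + ((fun p : Int × Int => a + p.1) p - p.2) else acc) 0 := by
        rw [e]; simp [List.foldl_map, PySem.List.len]
      have hopsD : (PySem.List.pyRange 0 (structures.length : Int)).foldl
          (fun acc i => if PySem.List.pyGetD structures i 0 < d - i
            then acc + (d - i - PySem.List.pyGetD structures i 0) else acc) 0
          = l.foldl (fun acc p => if p.2 < (fun p : Int × Int => d - p.1) p
            then acc + ((fun p : Int × Int => d - p.1) p - p.2) else acc) 0 := by
        rw [e]; simp [List.foldl_map, PySem.List.len]
      rw [hopsA, hopsD, ops_sum l _ 0 hda, ops_sum l _ 0 hdd,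
        sum_const_add, sum_const_sub]
      have hfst : (l.map (·.1)).sum
          = (structures.length : Int) * 0
            + ((structures.length : Int) * ((structures.length : Int) - 1)) / 2 := by
        rw [hl]; exact sum_fst_enumerate structures 0
      have hsnd : (l.map (·.2)).sum = structures.sum := by
        rw [hl]; rw [PySem.List.map_snd_enumerate]
      have hlen2 : (l.length : Int) = (structures.length : Int) := by
        rw [hl]; simp [PySem.List.length_enumerate]
      rw [hfst, hsnd, hlen2, PySem.Int.floordiv_eq_ediv_of_pos (by norm_num : (0:Int) < 2),
        ← min_sub_sub_right]
      congr 1 <;> ring
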